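-- pv_equiv track=rewrite | github.com/lzyrapx/Project-Euler | Math_Library/base.py | _sum_mod
-- ===== SOURCE A (Python) =====
-- def _sum_mod(n):
--     """return n % 2 + n % 3 + ... + n % (n-1)"""
--
--     from itertools import takewhile, count
--
--     sm = i = 0
--     for i in takewhile(lambda x: n//x - n//(x+1) > 4, count(1)):
--         a = n % (n//(i+1) + 1)
--         b = n % (n//i) if i > 1 else 1
--         c = (a-b) // i + 1
--         sm += b*c + i*(c - 1)*c // 2
--     sm += sum(n % j for j in range(2, n//(i+1) + 1))
--     return sm
-- ===== SOURCE B (Python) =====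
-- def _sum_mod(n):
--     """return n % 2 + n % 3 + ... + n % (n-1)"""
--     total = 0
--     k = 2
--     while k < n:
--         q = n // k
--         k2 = min(n - 1, n // q)
--         c = k2 - k + 1
--         total += n * c - q * (k + k2) * c // 2
--         k = k2 + 1
--     return total
-- ===== Notes on version B (the rewrite author's own statement) =====
-- stated objective: alternative
-- what changed: Replaces A's takewhile loop over quotient indices i (closing each block from its boundary residues a,b and a residual range sum) by the complement identity n%k = n - k*(n//k): one while loop that jumps k block-by-block (k2 = min(n-1, n//q)) and adds n*c minus a triangular-number term, with no residue arithmetic and no residual loop.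
import Mathlib
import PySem

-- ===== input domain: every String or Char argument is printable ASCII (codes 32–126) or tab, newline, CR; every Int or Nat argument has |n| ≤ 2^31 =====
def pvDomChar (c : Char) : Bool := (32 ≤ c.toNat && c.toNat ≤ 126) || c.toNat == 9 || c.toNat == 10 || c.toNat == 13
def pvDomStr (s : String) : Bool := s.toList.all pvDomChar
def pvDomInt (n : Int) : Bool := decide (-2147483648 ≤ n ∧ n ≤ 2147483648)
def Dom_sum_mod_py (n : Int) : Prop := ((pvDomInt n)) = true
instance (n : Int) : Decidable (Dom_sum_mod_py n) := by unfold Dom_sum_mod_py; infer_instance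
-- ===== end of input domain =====

-- B replaces A's takewhile-over-quotient-index loop (boundary residues a,b plus a residual range sum) by a
-- while loop jumping k block-by-block with the complement identity n%k = n - k*(n//k); objective: alternative.

-- ===== PORT A =====
-- the body of one iteration of A's takewhile loop at i = x:
--   a = n % (n//(i+1) + 1); b = n % (n//i) if i > 1 else 1; c = (a-b)//i + 1; sm += b*c + i*(c-1)*c//2
def stepAdd (n x : Int) : Int :=
  let a := PySem.Int.mod n (PySem.Int.floordiv n (x+1) + 1)
  let b := if x > 1 then PySem.Int.mod n (PySem.Int.floordiv n x) else 1
  let c := PySem.Int.floordiv (a - b) x + 1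
  b*c + PySem.Int.floordiv (x*(c-1)*c) 2

-- the 'for i in takewhile(cond, count(1))' loop; fuel only guards totality (the Python
-- condition fails long before fuel runs out, since cond at x needs n//x ≥ 5, i.e. x ≤ n/5)
def sumModLoop (n : Int) : Nat → Int → Int → Int → Int × Int
  | 0, _, sm, i => (sm, i)
  | fuel+1, x, sm, i =>
    if PySem.Int.floordiv n x - PySem.Int.floordiv n (x+1) > 4 then
      sumModLoop n fuel (x+1) (sm + stepAdd n x) x
    else (sm, i)

def sum_mod_py (n : Int) : Int :=
  let p := sumModLoop n (n.toNat + 2) 1 0 0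
  p.1 + ((PySem.List.pyRange 2 (PySem.Int.floordiv n (p.2+1) + 1) 1).map (fun j => PySem.Int.mod n j)).sum

-- ===== PORT B =====
-- the 'while k < n' loop of B; fuel only guards totality (k strictly increases each
-- iteration, so the guard k < n fails within n - 2 iterations)
def altLoop (n : Int) : Nat → Int → Int → Int
  | 0, _, total => total
  | fuel+1, k, total =>
    if k < n then
      let q := PySem.Int.floordiv n k
      let k2 := min (n-1) (PySem.Int.floordiv n q)
      let c := k2 - k + 1
      altLoop n fuel (k2+1) (total + n*c - PySem.Int.floordiv (q*(k+k2)*c) 2)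
    else total

def sum_mod_py_alt (n : Int) : Int := altLoop n (n.toNat + 2) 2 0

-- ===== PRECONDITION & SPEC =====
def Spec_sum_mod_py (n : Int) (out : Int) : Prop := out = sum_mod_py_alt n
instance (n : Int) (out : Int) : Decidable (Spec_sum_mod_py n out) := by unfold Spec_sum_mod_py; infer_instance

-- ===== CLAIM (what is proved, stated in full; the proofs are below) =====
def Claim_equal_sum_mod_py : Prop := ∀ (n : Int), Dom_sum_mod_py n → Spec_sum_mod_py n (sum_mod_py n)

-- ===== LEMMAS AND PROOFS =====

-- partial sum S(t) = Σ_{j ∈ range(2,t)} n % j, in Python-mod form (the tail sum of A)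
def pvS (n t : Int) : Int := ((PySem.List.pyRange 2 t 1).map (fun j => PySem.Int.mod n j)).sum

-- in the block n//(x+1) < j ≤ n//x every j has quotient exactly x, hence n % j = n - x*j
lemma fdiv_block (n x j : Int) (hn : 0 ≤ n) (hx : 0 < x)
    (h1 : n / (x+1) < j) (h2 : j ≤ n / x) : n % j = n - x * j := by
  have hj : 0 < j := lt_of_le_of_lt (Int.ediv_nonneg hn (by omega)) h1
  have hxj : x * j ≤ n := by
    have := (Int.le_ediv_iff_mul_le hx).mp h2
    linarith [this]
  have hup : n < (x+1) * j := by
    have h1' := (Int.ediv_lt_iff_lt_mul (by omega : (0:Int) < x+1)).mp h1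
    linarith [h1']
  have hq : n / j = x := by
    have hle : x ≤ n / j := (Int.le_ediv_iff_mul_le hj).mpr (by linarith)
    have hlt : n / j < x + 1 := (Int.ediv_lt_iff_lt_mul hj).mpr (by linarith)
    omega
  rw [Int.emod_def n j, hq]; ring

-- arithmetic series: twice the sum of n - x*(a + k) over k < c
lemma sum_list_linear (n x a : Int) : ∀ c : Nat,
    2 * (((List.range c).map (fun k : Nat => n - x * (a + k))).sum)
      = 2*c*n - 2*x*c*a - x*c*(c-1) := by
  intro c
  induction c with
  | zero => simp
  | succ c ih =>
      rw [List.range_succ, List.map_append, List.sum_append]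
      simp only [List.map_cons, List.map_nil, List.sum_cons, List.sum_nil]
      push_cast
      push_cast at ih
      linarith [ih]

-- one loop iteration adds exactly the block sum S(n//x + 1) - S(n//(x+1) + 1)
lemma block_step (n x : Int) (hn : 0 < n) (hx : 0 < x)
    (hc : PySem.Int.floordiv n x - PySem.Int.floordiv n (x+1) > 4) :
    stepAdd n x + pvS n (PySem.Int.floordiv n (x+1) + 1)
      = pvS n (PySem.Int.floordiv n x + 1) := by
  have hfx : PySem.Int.floordiv n x = n / x := PySem.Int.floordiv_eq_ediv_of_pos hx
  have hfx1 : PySem.Int.floordiv n (x+1) = n / (x+1) := PySem.Int.floordiv_eq_ediv_of_pos (by omega)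
  rw [hfx, hfx1] at hc ⊢
  set m := n / x with hm
  set m' := n / (x+1) with hm'
  have hm'0 : 0 ≤ m' := Int.ediv_nonneg (le_of_lt hn) (by omega)
  have hmm' : 4 < m - m' := by omega
  have h5x : 5 * x ≤ n := (Int.le_ediv_iff_mul_le hx).mp (by omega)
  have hm'1 : 1 ≤ m' := (Int.le_ediv_iff_mul_le (by omega : (0:Int) < x+1)).mpr (by linarith)
  -- split the tail sum at m'+1
  have hsplit : pvS n (m + 1) = pvS n (m' + 1)
      + ((PySem.List.pyRange (m'+1) (m+1) 1).map (fun j => PySem.Int.mod n j)).sum := by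
    unfold pvS
    rw [PySem.List.pyRange_one_append 2 (m'+1) (m+1) (by omega) (by omega),
        List.map_append, List.sum_append]
  set C' := (m - m').toNat with hCdef
  have hC' : (C' : Int) = m - m' := Int.toNat_of_nonneg (by omega)
  -- the block elements are n - x*j
  have hblock : (PySem.List.pyRange (m'+1) (m+1) 1).map (fun j => PySem.Int.mod n j)
      = (List.range C').map (fun k : Nat => n - x * (m' + 1 + k)) := by
    rw [PySem.List.pyRange_one]
    have hlen : ((m+1) - (m'+1)).toNat = C' := by
      rw [hCdef]; congr 1; ring
    rw [hlen, List.map_map]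
    apply List.map_congr_left
    intro k hk
    have hk' : (k : Int) < m - m' := by
      rw [← hC']; exact_mod_cast List.mem_range.mp hk
    have hk0 : (0:Int) ≤ (k:Int) := Int.natCast_nonneg k
    simp only [Function.comp]
    rw [PySem.Int.mod_eq_emod_of_pos (by omega)]
    exact fdiv_block n x (m'+1+k) (le_of_lt hn) hx (by omega) (by omega)
  set Bsum := ((PySem.List.pyRange (m'+1) (m+1) 1).map (fun j => PySem.Int.mod n j)).sum with hBdef
  have h2B : 2 * Bsum = 2*C'*n - 2*x*C'*(m'+1) - x*C'*(C'-1) := by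
    rw [hBdef, hblock]; exact sum_list_linear n x (m'+1) C'
  rw [hC'] at h2B
  rw [hsplit]
  -- evaluate the closed-form term of one iteration
  simp only [stepAdd, hfx, hfx1]
  have ha : PySem.Int.mod n (m' + 1) = n - x*(m'+1) := by
    rw [PySem.Int.mod_eq_emod_of_pos (by omega)]
    exact fdiv_block n x (m'+1) (le_of_lt hn) hx (by omega) (by omega)
  by_cases hx1 : x > 1
  · simp only [if_pos hx1]
    have hb : PySem.Int.mod n m = n - x*m := by
      rw [PySem.Int.mod_eq_emod_of_pos (by omega)]
      exact fdiv_block n x m (le_of_lt hn) hx (by omega) le_rfl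
    rw [ha, hb]
    have hab : (n - x*(m'+1)) - (n - x*m) = (m - m' - 1) * x := by ring
    rw [hab, PySem.Int.floordiv_eq_ediv_of_pos hx, Int.mul_ediv_cancel _ (by omega : x ≠ 0)]
    obtain ⟨k, hk⟩ := Int.even_mul_succ_self (m - m' - 1)
    have hk' : (m - m' - 1 + 1 - 1) * (m - m' - 1 + 1) = k + k := by linear_combination hk
    have hkx : x * (m - m' - 1 + 1 - 1) * (m - m' - 1 + 1) = (x*k) * 2 := by
      linear_combination x * hk'
    rw [hkx, PySem.Int.floordiv_eq_ediv_of_pos (by omega : (0:Int) < 2),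
        Int.mul_ediv_cancel _ (by omega : (2:Int) ≠ 0)]
    have h2 : 2 * ((n - x*m) * (m - m' - 1 + 1) + x*k) = 2 * Bsum := by
      linear_combination (-1) * h2B - x * hk'
    linarith [h2]
  · simp only [if_neg hx1]
    have hxx : x = 1 := by omega
    subst hxx
    simp only [Int.ediv_one] at hm
    rw [ha]
    have hab : (n - 1*(m'+1)) - 1 = n - m' - 2 := by ring
    rw [hab, PySem.Int.floordiv_eq_ediv_of_pos (by omega : (0:Int) < 1), Int.ediv_one]
    obtain ⟨k, hk⟩ := Int.even_mul_succ_self (n - m' - 2 + 1 - 1)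
    have hk' : (n - m' - 2 + 1 - 1) * (n - m' - 2 + 1) = k + k := by linear_combination hk
    have hkx : 1 * (n - m' - 2 + 1 - 1) * (n - m' - 2 + 1) = (1*k) * 2 := by
      linear_combination hk'
    rw [hkx, PySem.Int.floordiv_eq_ediv_of_pos (by omega : (0:Int) < 2),
        Int.mul_ediv_cancel _ (by omega : (2:Int) ≠ 0)]
    have h2 : 2 * (1 * (n - m' - 2 + 1) + 1*k) = 2 * Bsum := by
      rw [hm] at h2B
      linear_combination (-1) * h2B - hk'
    rw [hm] at *
    linarith [h2]

-- loop invariant: final (sm,i) satisfies sm + S(n//(i+1)+1) = sm₀ + S(n//x+1)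
lemma loop_inv (n : Int) (hn : 0 < n) : ∀ (fuel : Nat) (x sm : Int), 0 < x →
    (sumModLoop n fuel x sm (x-1)).1
      + pvS n (PySem.Int.floordiv n ((sumModLoop n fuel x sm (x-1)).2 + 1) + 1)
    = sm + pvS n (PySem.Int.floordiv n x + 1) := by
  intro fuel
  induction fuel with
  | zero => intro x sm hx; simp only [sumModLoop]; norm_num
  | succ fuel ih =>
      intro x sm hx
      simp only [sumModLoop]
      by_cases hcond : PySem.Int.floordiv n x - PySem.Int.floordiv n (x+1) > 4
      · simp only [if_pos hcond]
        have hIH := ih (x+1) (sm + stepAdd n x) (by omega)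
        have hx1 : (x+1:Int) - 1 = x := by ring
        rw [hx1] at hIH
        rw [hIH]
        have := block_step n x hn hx hcond
        linarith [this]
      · simp only [if_neg hcond]
        norm_num

-- when the takewhile condition fails at the very first x the loop returns (sm, i) unchanged
lemma loop_exit (n : Int) (fuel : Nat) (x sm i : Int)
    (h : ¬ (PySem.Int.floordiv n x - PySem.Int.floordiv n (x+1) > 4)) :
    sumModLoop n (fuel+1) x sm i = (sm, i) := by
  simp only [sumModLoop, if_neg h]

-- invariant of B's while loop: it adds exactly the remaining sum Σ_{j=k}^{n-1} n % j
lemma alt_inv (n : Int) (hn : 1 < n) : ∀ (fuel : Nat) (k total : Int), 2 ≤ k → k ≤ n →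
    (n - k).toNat < fuel →
    altLoop n fuel k total = total + (pvS n n - pvS n k) := by
  intro fuel
  induction fuel with
  | zero => intro k total _ _ hf; exact absurd hf (by omega)
  | succ fuel ih =>
      intro k total hk hkn hf
      simp only [altLoop]
      by_cases hlt : k < n
      · simp only [if_pos hlt]
        have hk0 : (0:Int) < k := by omega
        have hfq : PySem.Int.floordiv n k = n / k := PySem.Int.floordiv_eq_ediv_of_pos hk0
        rw [hfq]
        set q := n / k with hqdef
        have hq1 : 1 ≤ q := (Int.le_ediv_iff_mul_le hk0).mpr (by omega)
        have hfq2 : PySem.Int.floordiv n q = n / q := PySem.Int.floordiv_eq_ediv_of_pos (by omega)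
        rw [hfq2]
        set k2 := min (n-1) (n / q) with hk2def
        have hqk : q * k ≤ n := by
          have := (Int.le_ediv_iff_mul_le hk0).mp (le_refl q)
          linarith [this]
        have hkk2 : k ≤ k2 := by
          have h1 : k ≤ n / q := (Int.le_ediv_iff_mul_le (by omega : (0:Int) < q)).mpr
            (by linarith)
          exact le_min (by omega) h1
        have hk2n : k2 ≤ n - 1 := min_le_left _ _
        have hk2q : k2 ≤ n / q := min_le_right _ _
        have hlow : n / (q+1) < k := by
          have hlt2 : n < (q + 1) * k := by
            have := Int.lt_ediv_add_one_mul_self n hk0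
            rw [← hqdef] at this
            linarith [this]
          exact (Int.ediv_lt_iff_lt_mul (by omega : (0:Int) < q+1)).mpr (by linarith)
        -- split pvS at k and the block elements are n - q*j
        have hsplit : pvS n (k2 + 1) = pvS n k
            + ((PySem.List.pyRange k (k2+1) 1).map (fun j => PySem.Int.mod n j)).sum := by
          unfold pvS
          rw [PySem.List.pyRange_one_append 2 k (k2+1) (by omega) (by omega),
              List.map_append, List.sum_append]
        set C' := (k2 + 1 - k).toNat with hCdef
        have hC' : (C' : Int) = k2 + 1 - k := Int.toNat_of_nonneg (by omega)
        have hblock : (PySem.List.pyRange k (k2+1) 1).map (fun j => PySem.Int.mod n j)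
            = (List.range C').map (fun t : Nat => n - q * (k + t)) := by
          rw [PySem.List.pyRange_one]
          rw [show ((k2+1) - k).toNat = C' from rfl, List.map_map]
          apply List.map_congr_left
          intro t ht
          have ht' : (t : Int) < k2 + 1 - k := by
            rw [← hC']; exact_mod_cast List.mem_range.mp ht
          have ht0 : (0:Int) ≤ (t:Int) := Int.natCast_nonneg t
          simp only [Function.comp]
          rw [PySem.Int.mod_eq_emod_of_pos (by omega)]
          exact fdiv_block n q (k + t) (by omega) (by omega) (by omega) (by omega)
        set Bsum := ((PySem.List.pyRange k (k2+1) 1).map (fun j => PySem.Int.mod n j)).sum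
          with hBdef
        have h2B : 2 * Bsum = 2*C'*n - 2*q*C'*k - q*C'*(C'-1) := by
          rw [hBdef, hblock]; exact sum_list_linear n q k C'
        rw [hC'] at h2B
        -- the triangular-number term is even, so its floor-halving is exact
        obtain ⟨r, hr⟩ : Even ((k + k2) * (k2 - k + 1)) := by
          rcases Int.even_or_odd (k + k2) with h | h
          · exact (Int.even_mul).mpr (Or.inl h)
          · obtain ⟨t, ht⟩ := h
            exact (Int.even_mul).mpr (Or.inr ⟨t + 1 - k, by omega⟩)
        have hq2 : q * (k + k2) * (k2 - k + 1) = (q * r) * 2 := by linear_combination q * hr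
        rw [hq2, PySem.Int.floordiv_eq_ediv_of_pos (by omega : (0:Int) < 2),
            Int.mul_ediv_cancel _ (by omega : (2:Int) ≠ 0)]
        rw [ih (k2+1) (total + n*(k2-k+1) - q*r) (by omega) (by omega) (by omega)]
        have h2 : 2 * (n*(k2-k+1) - q*r) = 2 * Bsum := by
          linear_combination (-1) * h2B + q * hr
        have hsum : pvS n (k2+1) = pvS n k + Bsum := hsplit
        linarith [h2, hsum]
      · simp only [if_neg hlt]
        have : k = n := by omega
        subst this
        ring

-- B's port computes Σ_{j ∈ range(2,n)} n % j
lemma alt_eq_pvS (n : Int) : sum_mod_py_alt n = pvS n n := by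
  unfold sum_mod_py_alt
  by_cases hn : n ≤ 2
  · rw [show n.toNat + 2 = (n.toNat + 1) + 1 from rfl]
    simp only [altLoop, if_neg (by omega : ¬ (2:Int) < n)]
    simp [pvS, PySem.List.pyRange_one_eq_nil (by omega : n ≤ 2)]
  · rw [alt_inv n (by omega) (n.toNat + 2) 2 0 (le_refl 2) (by omega) (by omega)]
    simp [pvS, PySem.List.pyRange_one_eq_nil (by omega : (2:Int) ≤ 2)]

-- ===== VERDICT (by name: the statement is the Claim_ definition above) =====
theorem sum_mod_py_spec : Claim_equal_sum_mod_py := by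
  unfold Claim_equal_sum_mod_py Spec_sum_mod_py
  intro n _
  rw [alt_eq_pvS]
  unfold sum_mod_py
  by_cases hn : n ≤ 1
  · -- the takewhile condition fails at x = 1, the loop body never runs, both sums are empty
    have hcond : ¬ (PySem.Int.floordiv n 1 - PySem.Int.floordiv n (1+1) > 4) := by
      rw [show ((1:Int)+1) = 2 from rfl,
          PySem.Int.floordiv_eq_ediv_of_pos (by omega : (0:Int) < 1),
          PySem.Int.floordiv_eq_ediv_of_pos (by omega : (0:Int) < 2), Int.ediv_one]
      omega
    rw [show n.toNat + 2 = (n.toNat + 1) + 1 from rfl, loop_exit n (n.toNat+1) 1 0 0 hcond]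
    simp only [show ((0:Int)+1) = 1 from rfl]
    rw [PySem.Int.floordiv_eq_ediv_of_pos (by omega : (0:Int) < 1), Int.ediv_one]
    rw [PySem.List.pyRange_one_eq_nil (by omega : n + 1 ≤ 2)]
    simp [pvS, PySem.List.pyRange_one_eq_nil (by omega : n ≤ 2)]
  · push Not at hn
    have hinv := loop_inv n (by omega) (n.toNat + 2) 1 0 (by omega)
    norm_num at hinv
    show (sumModLoop n (n.toNat + 2) 1 0 0).1 + pvS n (PySem.Int.floordiv n ((sumModLoop n (n.toNat + 2) 1 0 0).2 + 1) + 1) = pvS n n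
    rw [hinv]
    unfold pvS
    rw [PySem.List.pyRange_one_succ_right (by omega : (2:Int) ≤ n), List.map_append,
        List.sum_append]
    simp only [List.map_cons, List.map_nil, List.sum_cons, List.sum_nil]
    rw [PySem.Int.mod_eq_emod_of_pos (by omega : (0:Int) < n), Int.emod_self]
    ring
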